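-- pv_equiv track=rewrite | github.com/David-Hien/unit_1-2021 | source_code/main.py | message_decoder
-- ===== SOURCE A (Python) =====
-- def message_decoder(key: int, message: str):
--     decoded_message = ""
--     for letter in message:
--         code = ord(letter) - key
--         while code < 65:
--             code += 57
--
--         decoded_letter = chr(code)
--         decoded_message += decoded_letter
--
--     return decoded_message
-- ===== SOURCE B (Python) =====
-- def message_decoder(key: int, message: str):
--     # Closed-form wraparound: one modular step per character instead of an additive while-loop.
--     return "".join(
--         chr(c) if (c := ord(ch) - key) >= 65 else chr(65 + (c - 65) % 57)
--         for ch in message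
--     )
-- ===== Notes on version B (the rewrite author's own statement) =====
-- stated objective: faster
-- what changed: The additive while-loop (add 57 until the code reaches 65) and string += accumulation are replaced by a single closed-form modular step per character (65 + (code-65) % 57) inside a join of a generator.
-- outside the precondition, e.g. on message_decoder(-1114047, 'A'): A raises ValueError, B raises ValueError
import Mathlib
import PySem

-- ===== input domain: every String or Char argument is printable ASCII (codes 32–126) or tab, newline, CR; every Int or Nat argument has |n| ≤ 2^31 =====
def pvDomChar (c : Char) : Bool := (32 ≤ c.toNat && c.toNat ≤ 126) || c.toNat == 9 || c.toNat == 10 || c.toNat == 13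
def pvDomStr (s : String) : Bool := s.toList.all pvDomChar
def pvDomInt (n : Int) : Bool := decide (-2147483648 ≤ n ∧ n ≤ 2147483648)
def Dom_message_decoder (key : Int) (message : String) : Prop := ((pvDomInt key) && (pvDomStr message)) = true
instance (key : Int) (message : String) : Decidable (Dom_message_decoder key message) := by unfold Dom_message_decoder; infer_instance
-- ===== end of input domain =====

-- B replaces A's additive while-loop with one closed-form modular step per character (asymptotically faster for large keys).

-- ===== PORT A =====
-- `while code < 65: code += 57` of A, literal structural recursion.
def pvBump (code : Int) : Int :=
  if code < 65 then pvBump (code + 57) else code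
termination_by (65 - code).toNat
decreasing_by simp_wf; omega

-- A builds its result string by `+=`; ported as a List Char accumulator snoc-ed per letter,
-- turned into a String at the end. chr/ord are Char.ofNat/Char.toNat, exact on the valid
-- non-surrogate codepoints admitted by Pre_.
def message_decoder (key : Int) (message : String) : String :=
  String.mk (message.toList.foldl
    (fun decoded letter =>
      let code := pvBump ((letter.toNat : Int) - key)
      decoded ++ [Char.ofNat code.toNat])
    [])

-- ===== PORT B =====
-- Source B's per-character closed form: chr(c) if c >= 65 else chr(65 + (c - 65) % 57)
def pvAltChar (key : Int) (ch : Char) : Char :=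
  let c : Int := (ch.toNat : Int) - key
  if 65 ≤ c then Char.ofNat c.toNat
  else Char.ofNat (65 + PySem.Int.mod (c - 65) 57).toNat

def message_decoder_alt (key : Int) (message : String) : String :=
  String.mk (message.toList.map (pvAltChar key))

-- ===== PRECONDITION & SPEC =====
-- Pre_ excludes inputs where some decoded codepoint ord(letter)-key exceeds 0x10FFFF (Python's
-- chr raises ValueError there, in both A and B) or lands in the lone-surrogate range
-- 0xD800-0xDFFF (A returns a string of lone surrogates, a value not representable as a Lean
-- Char/String; B's Python returns the same).
def Pre_message_decoder (key : Int) (message : String) : Prop :=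
  (message.toList.all (fun c =>
    ((c.toNat : Int) - key ≤ 1114111
      && ((c.toNat : Int) - key < 55296 || (57343 : Int) < (c.toNat : Int) - key) : Bool))) = true
instance (key : Int) (message : String) : Decidable (Pre_message_decoder key message) := by
  unfold Pre_message_decoder; infer_instance

def pvWitness_message_decoder : Int × String := (3, "KHOOR")

def Spec_message_decoder (key : Int) (message : String) (out : String) : Prop := out = message_decoder_alt key message
instance (key : Int) (message : String) (out : String) : Decidable (Spec_message_decoder key message out) := by unfold Spec_message_decoder; infer_instance

-- ===== CLAIM (what is proved, stated in full; the proofs are below) =====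
def Claim_equal_message_decoder : Prop := ∀ (key : Int) (message : String), Dom_message_decoder key message → Pre_message_decoder key message → Spec_message_decoder key message (message_decoder key message)

-- ===== LEMMAS AND PROOFS =====

-- A's while-loop equals the closed modular form.
theorem pvMod57 (a : Int) : PySem.Int.mod a 57 = a % 57 :=
  PySem.Int.mod_eq_emod_of_pos (by norm_num)

theorem pvBump_eq (c : Int) :
    pvBump c = if 65 ≤ c then c else 65 + PySem.Int.mod (c - 65) 57 := by
  induction c using pvBump.induct with
  | case1 c h ih =>
      rw [pvBump, if_pos h, ih]
      simp only [pvMod57]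
      split_ifs with h1 h2 <;> omega
  | case2 c h =>
      rw [pvBump, if_neg h, if_pos (by omega)]

theorem pvBump_char (key : Int) (c : Char) :
    Char.ofNat (pvBump ((c.toNat : Int) - key)).toNat = pvAltChar key c := by
  rw [pvBump_eq, pvAltChar]
  split_ifs <;> rfl

theorem foldl_snoc_map (key : Int) (l acc : List Char) :
    l.foldl (fun decoded letter =>
        decoded ++ [Char.ofNat (pvBump ((letter.toNat : Int) - key)).toNat]) acc
      = acc ++ l.map (pvAltChar key) := by
  induction l generalizing acc with
  | nil => simp
  | cons x xs ih =>
      rw [List.foldl_cons, ih]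
      simp [pvBump_char]

-- ===== VERDICT (by name: the statement is the Claim_ definition above) =====
theorem message_decoder_spec : Claim_equal_message_decoder := by
  intro key message _ _
  show message_decoder key message = message_decoder_alt key message
  simp only [message_decoder, message_decoder_alt]
  rw [foldl_snoc_map]
  simp
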